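-- pv_equiv track=rewrite | github.com/mdsingh007/kushu | Edabit/shared_unique.py | letters
-- ===== SOURCE A (Python) =====
-- def letters(word1, word2):
--     unique1 = []
--     unique2 = []
--     shared = []
--     for elem in word1:
--         if elem not in word2 and elem not in unique1:
--             unique1.append(elem)
--         elif elem in word2 and elem not in shared:
--             shared.append(elem)
--     for elem in word2:
--         if elem not in word1 and elem not in unique2:
--             unique2.append(elem)
--     return "".join(sorted(shared)), "".join(sorted(unique1)), "".join(sorted(unique2))
-- ===== SOURCE B (Python) =====
-- def letters(word1, word2):
--     shared = []
--     unique1 = []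
--     unique2 = []
--     for c in sorted(set(word1) | set(word2)):
--         in1 = c in word1
--         in2 = c in word2
--         if in1 and in2:
--             shared.append(c)
--         elif in1:
--             unique1.append(c)
--         else:
--             unique2.append(c)
--     return "".join(shared), "".join(unique1), "".join(unique2)
-- ===== Notes on version B (the rewrite author's own statement) =====
-- stated objective: faster
-- what changed: Instead of A's two dedup-scan loops (with linear membership scans against the growing accumulators) followed by three trailing sorts, B sorts the set union of both words once and classifies each character of that ordered universe into shared/unique1/unique2 in a single pass, building the outputs already sorted.
import Mathlib
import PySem

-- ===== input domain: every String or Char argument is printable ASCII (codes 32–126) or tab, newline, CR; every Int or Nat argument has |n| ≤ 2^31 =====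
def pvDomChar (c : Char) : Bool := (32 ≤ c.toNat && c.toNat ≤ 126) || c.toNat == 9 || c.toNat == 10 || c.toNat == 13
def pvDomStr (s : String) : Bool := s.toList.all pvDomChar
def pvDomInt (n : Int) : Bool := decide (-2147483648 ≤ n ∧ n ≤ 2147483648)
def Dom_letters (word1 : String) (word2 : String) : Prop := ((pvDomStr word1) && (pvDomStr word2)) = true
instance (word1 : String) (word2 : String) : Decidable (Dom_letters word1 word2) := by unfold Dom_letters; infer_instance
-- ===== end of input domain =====

-- B replaces A's two dedup-scan loops plus three trailing sorts by one classifying pass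
-- over the sorted character universe of both words (objective: alternative decomposition).

-- ===== PORT A =====
-- A's first loop: state (unique1, shared), appended in order, membership checks as in A.
def lettersLoop1 (w2 : List Char) (l : List Char) (st : List Char × List Char) :
    List Char × List Char :=
  l.foldl (fun st elem =>
    if !w2.contains elem && !st.1.contains elem then (st.1 ++ [elem], st.2)
    else if w2.contains elem && !st.2.contains elem then (st.1, st.2 ++ [elem])
    else st) st

-- A's second loop: unique2 accumulator.
def lettersLoop2 (w1 : List Char) (l : List Char) (u2 : List Char) : List Char :=
  l.foldl (fun u2 elem =>
    if !w1.contains elem && !u2.contains elem then u2 ++ [elem] else u2) u2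

def letters (word1 : String) (word2 : String) : String × String × String :=
  (String.mk (PySem.List.sorted (lettersLoop1 word2.toList word1.toList ([], [])).2 (fun x => x) false),
   String.mk (PySem.List.sorted (lettersLoop1 word2.toList word1.toList ([], [])).1 (fun x => x) false),
   String.mk (PySem.List.sorted (lettersLoop2 word1.toList word2.toList []) (fun x => x) false))

-- ===== PORT B =====
-- B's single pass: classify each char of the sorted union into (shared, unique1, unique2).
def lettersClassify (w1 w2 : List Char) (u : List Char)
    (st : List Char × List Char × List Char) : List Char × List Char × List Char :=
  u.foldl (fun st c =>
    if w1.contains c && w2.contains c then (st.1 ++ [c], st.2.1, st.2.2)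
    else if w1.contains c then (st.1, st.2.1 ++ [c], st.2.2)
    else (st.1, st.2.1, st.2.2 ++ [c])) st

def lettersUniv (w1 w2 : List Char) : List Char :=
  PySem.List.sorted (PySem.Set.union (PySem.Set.ofList w1) w2) (fun c => c) false

def letters_alt (word1 : String) (word2 : String) : String × String × String :=
  (String.mk (lettersClassify word1.toList word2.toList (lettersUniv word1.toList word2.toList) ([], [], [])).1,
   String.mk (lettersClassify word1.toList word2.toList (lettersUniv word1.toList word2.toList) ([], [], [])).2.1,
   String.mk (lettersClassify word1.toList word2.toList (lettersUniv word1.toList word2.toList) ([], [], [])).2.2)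

-- ===== PRECONDITION & SPEC =====
def Spec_letters (word1 : String) (word2 : String) (out : String × String × String) : Prop := out = letters_alt word1 word2
instance (word1 : String) (word2 : String) (out : String × String × String) : Decidable (Spec_letters word1 word2 out) := by unfold Spec_letters; infer_instance

-- ===== CLAIM (what is proved, stated in full; the proofs are below) =====
def Claim_equal_letters : Prop := ∀ (word1 : String) (word2 : String), Dom_letters word1 word2 → Spec_letters word1 word2 (letters word1 word2)

-- ===== LEMMAS AND PROOFS =====

-- B's fold is three filters of the universe list.
theorem lettersClassify_eq_filters (w1 w2 : List Char) (u : List Char)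
    (a b c : List Char) :
    lettersClassify w1 w2 u (a, b, c) =
      (a ++ u.filter (fun x => w1.contains x && w2.contains x),
       b ++ u.filter (fun x => w1.contains x && !w2.contains x),
       c ++ u.filter (fun x => !w1.contains x)) := by
  induction u generalizing a b c with
  | nil => simp [lettersClassify]
  | cons x t ih =>
    by_cases h1 : x ∈ w1 <;> by_cases h2 : x ∈ w2
    · simpa [lettersClassify, List.filter_cons, h1, h2] using ih (a ++ [x]) b c
    · simpa [lettersClassify, List.filter_cons, h1, h2] using ih a (b ++ [x]) c
    · simpa [lettersClassify, List.filter_cons, h1, h2] using ih a b (c ++ [x])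
    · simpa [lettersClassify, List.filter_cons, h1, h2] using ih a b (c ++ [x])

-- A's first loop: membership and nodup invariants.
theorem lettersLoop1_mem (w2 l : List Char) (a b : List Char) :
    (∀ x, x ∈ (lettersLoop1 w2 l (a, b)).1 ↔ x ∈ a ∨ (x ∈ l ∧ x ∉ w2)) ∧
    (∀ x, x ∈ (lettersLoop1 w2 l (a, b)).2 ↔ x ∈ b ∨ (x ∈ l ∧ x ∈ w2)) := by
  induction l generalizing a b with
  | nil => simp [lettersLoop1]
  | cons e t ih =>
    simp only [lettersLoop1, List.foldl_cons] at *
    by_cases h2 : e ∈ w2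
    · by_cases hb : e ∈ b
      · rw [if_neg (by simp [h2]), if_neg (by simp [hb])]
        refine ⟨fun x => ?_, fun x => ?_⟩
        · rw [(ih a b).1 x]; simp only [List.mem_cons]
          constructor
          · tauto
          · rintro (h | ⟨rfl | hx, hw⟩)
            exacts [Or.inl h, absurd h2 hw, Or.inr ⟨hx, hw⟩]
        · rw [(ih a b).2 x]; simp only [List.mem_cons]
          constructor
          · tauto
          · rintro (h | ⟨rfl | hx, hw⟩)
            exacts [Or.inl h, Or.inl hb, Or.inr ⟨hx, hw⟩]
      · rw [if_neg (by simp [h2]), if_pos (by simp [h2, hb])]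
        refine ⟨fun x => ?_, fun x => ?_⟩
        · rw [(ih a (b ++ [e])).1 x]; simp only [List.mem_cons]
          constructor
          · tauto
          · rintro (h | ⟨rfl | hx, hw⟩)
            exacts [Or.inl h, absurd h2 hw, Or.inr ⟨hx, hw⟩]
        · rw [(ih a (b ++ [e])).2 x]
          simp only [List.mem_cons, List.mem_append, List.not_mem_nil, or_false]
          constructor
          · rintro ((h | rfl) | ⟨hx, hw⟩)
            exacts [Or.inl h, Or.inr ⟨Or.inl rfl, h2⟩, Or.inr ⟨Or.inr hx, hw⟩]
          · rintro (h | ⟨rfl | hx, hw⟩)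
            exacts [Or.inl (Or.inl h), Or.inl (Or.inr rfl), Or.inr ⟨hx, hw⟩]
    · by_cases ha : e ∈ a
      · rw [if_neg (by simp [ha]), if_neg (by simp [h2])]
        refine ⟨fun x => ?_, fun x => ?_⟩
        · rw [(ih a b).1 x]; simp only [List.mem_cons]
          constructor
          · tauto
          · rintro (h | ⟨rfl | hx, hw⟩)
            exacts [Or.inl h, Or.inl ha, Or.inr ⟨hx, hw⟩]
        · rw [(ih a b).2 x]; simp only [List.mem_cons]
          constructor
          · tauto
          · rintro (h | ⟨rfl | hx, hw⟩)
            exacts [Or.inl h, absurd hw h2, Or.inr ⟨hx, hw⟩]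
      · rw [if_pos (by simp [h2, ha])]
        refine ⟨fun x => ?_, fun x => ?_⟩
        · rw [(ih (a ++ [e]) b).1 x]
          simp only [List.mem_cons, List.mem_append, List.not_mem_nil, or_false]
          constructor
          · rintro ((h | rfl) | ⟨hx, hw⟩)
            exacts [Or.inl h, Or.inr ⟨Or.inl rfl, h2⟩, Or.inr ⟨Or.inr hx, hw⟩]
          · rintro (h | ⟨rfl | hx, hw⟩)
            exacts [Or.inl (Or.inl h), Or.inl (Or.inr rfl), Or.inr ⟨hx, hw⟩]
        · rw [(ih (a ++ [e]) b).2 x]; simp only [List.mem_cons]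
          constructor
          · tauto
          · rintro (h | ⟨rfl | hx, hw⟩)
            exacts [Or.inl h, absurd hw h2, Or.inr ⟨hx, hw⟩]

theorem lettersLoop1_nodup (w2 l : List Char) (a b : List Char)
    (ha : a.Nodup) (hb : b.Nodup) :
    (lettersLoop1 w2 l (a, b)).1.Nodup ∧ (lettersLoop1 w2 l (a, b)).2.Nodup := by
  induction l generalizing a b with
  | nil => exact ⟨ha, hb⟩
  | cons e t ih =>
    simp only [lettersLoop1, List.foldl_cons] at *
    by_cases h2 : e ∈ w2
    · by_cases hb2 : e ∈ b
      · rw [if_neg (by simp [h2]), if_neg (by simp [hb2])]; exact ih a b ha hb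
      · rw [if_neg (by simp [h2]), if_pos (by simp [h2, hb2])]
        exact ih a (b ++ [e]) ha (by simp [List.nodup_append, hb]; intro a hab rfl; exact hb2 hab)
    · by_cases ha2 : e ∈ a
      · rw [if_neg (by simp [ha2]), if_neg (by simp [h2])]; exact ih a b ha hb
      · rw [if_pos (by simp [h2, ha2])]
        exact ih (a ++ [e]) b (by simp [List.nodup_append, ha]; intro a hab rfl; exact ha2 hab) hb

-- A's second loop: membership and nodup.
theorem lettersLoop2_mem (w1 l : List Char) (u : List Char) :
    ∀ x, x ∈ lettersLoop2 w1 l u ↔ x ∈ u ∨ (x ∈ l ∧ x ∉ w1) := by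
  induction l generalizing u with
  | nil => simp [lettersLoop2]
  | cons e t ih =>
    simp only [lettersLoop2, List.foldl_cons] at *
    by_cases h1 : e ∈ w1
    · intro x
      rw [if_neg (by simp [h1]), ih u x]; simp only [List.mem_cons]
      constructor
      · tauto
      · rintro (h | ⟨rfl | hx, hw⟩)
        exacts [Or.inl h, absurd h1 hw, Or.inr ⟨hx, hw⟩]
    · by_cases hu : e ∈ u
      · intro x
        rw [if_neg (by simp [hu]), ih u x]; simp only [List.mem_cons]
        constructor
        · tauto
        · rintro (h | ⟨rfl | hx, hw⟩)
          exacts [Or.inl h, Or.inl hu, Or.inr ⟨hx, hw⟩]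
      · intro x
        rw [if_pos (by simp [h1, hu]), ih (u ++ [e]) x]
        simp only [List.mem_cons, List.mem_append, List.not_mem_nil, or_false]
        constructor
        · rintro ((h | rfl) | ⟨hx, hw⟩)
          exacts [Or.inl h, Or.inr ⟨Or.inl rfl, h1⟩, Or.inr ⟨Or.inr hx, hw⟩]
        · rintro (h | ⟨rfl | hx, hw⟩)
          exacts [Or.inl (Or.inl h), Or.inl (Or.inr rfl), Or.inr ⟨hx, hw⟩]

theorem lettersLoop2_nodup (w1 l : List Char) (u : List Char) (hu : u.Nodup) :
    (lettersLoop2 w1 l u).Nodup := by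
  induction l generalizing u with
  | nil => exact hu
  | cons e t ih =>
    simp only [lettersLoop2, List.foldl_cons] at *
    by_cases h1 : e ∈ w1
    · rw [if_neg (by simp [h1])]; exact ih u hu
    · by_cases hum : e ∈ u
      · rw [if_neg (by simp [hum])]; exact ih u hu
      · rw [if_pos (by simp [h1, hum])]
        exact ih (u ++ [e]) (by simp [List.nodup_append, hu]; intro a hab rfl; exact hum hab)

-- sorting a nodup list equals any strictly increasing list with the same members
theorem sorted_eq_of_same_mem (xs ys : List Char) (hx : xs.Nodup)
    (hy : ys.Pairwise (· < ·)) (h : ∀ x, x ∈ xs ↔ x ∈ ys) :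
    PySem.List.sorted xs (fun x => x) false = ys := by
  refine PySem.List.sorted_eq_of_perm_of_pairwise_lt xs ys (fun x => x) ?_ ?_
  · exact ((List.perm_ext_iff_of_nodup hy.nodup hx).mpr (fun a => (h a).symm))
  · simpa using hy

-- the universe list is strictly increasing and contains the chars of both words
theorem univ_pairwise (w1 w2 : List Char) :
    (lettersUniv w1 w2).Pairwise (· < ·) := by
  have hnd : (PySem.Set.union (PySem.Set.ofList w1) w2).Nodup :=
    PySem.Set.nodup_union _ _ (PySem.Set.nodup_ofList _)
  have hle := PySem.List.sorted_pairwise (PySem.Set.union (PySem.Set.ofList w1) w2)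
      (fun c : Char => c)
  have hnd' : (lettersUniv w1 w2).Nodup :=
    (PySem.List.sorted_perm _ _ _).nodup_iff.mpr hnd
  exact (hle.and hnd').imp (fun h => lt_of_le_of_ne h.1 h.2)

theorem univ_mem (w1 w2 : List Char) (x : Char) :
    x ∈ lettersUniv w1 w2 ↔ x ∈ w1 ∨ x ∈ w2 := by
  rw [lettersUniv, PySem.List.mem_sorted, PySem.Set.mem_union, PySem.Set.mem_ofList]

-- ===== VERDICT (by name: the statement is the Claim_ definition above) =====
theorem letters_spec : Claim_equal_letters := by
  intro word1 word2 _
  unfold Spec_letters letters letters_alt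
  have hup := univ_pairwise word1.toList word2.toList
  have hum := univ_mem word1.toList word2.toList
  rw [lettersClassify_eq_filters]
  simp only [List.nil_append]
  obtain ⟨h1m, h2m⟩ := lettersLoop1_mem word2.toList word1.toList [] []
  obtain ⟨h1n, h2n⟩ := lettersLoop1_nodup word2.toList word1.toList [] [] List.nodup_nil List.nodup_nil
  refine Prod.ext ?_ (Prod.ext ?_ ?_)
  · -- shared
    show String.mk _ = String.mk _
    congr 1
    refine sorted_eq_of_same_mem _ _ h2n (hup.filter _) ?_
    intro x
    rw [h2m x, List.mem_filter, hum x]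
    simp; tauto
  · -- unique1
    show String.mk _ = String.mk _
    congr 1
    refine sorted_eq_of_same_mem _ _ h1n (hup.filter _) ?_
    intro x
    rw [h1m x, List.mem_filter, hum x]
    simp; tauto
  · -- unique2
    show String.mk _ = String.mk _
    congr 1
    refine sorted_eq_of_same_mem _ _ (lettersLoop2_nodup word1.toList word2.toList [] List.nodup_nil) (hup.filter _) ?_
    intro x
    rw [lettersLoop2_mem word1.toList word2.toList [] x, List.mem_filter, hum x]
    simp; tauto
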